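-- pv_equiv track=rewrite | github.com/jbcom/ai_game_dev | src/ai_game_dev/library.py | _extract_file_list
-- ===== SOURCE A (Python) =====
-- from typing import Dict, Any, List, Optional, Union
--
-- def _extract_file_list(content_list: List[str]) -> List[str]:
--     """Extract likely file names from generated content."""
--     files = []
--     common_extensions = ['.rs', '.py', '.gd', '.toml', '.json', '.md', '.js']
--
--     for content in content_list:
--         for ext in common_extensions:
--             if ext in content.lower():
--                 # Simple heuristic to find file names
--                 lines = content.split('\n')
--                 for line in lines:
--                     if ext in line and len(line) < 100:
--                         if any(char in line for char in ['/', '\\', '.']):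
--                             files.append(line.strip())
--                             break
--
--     return list(set(files))  # Remove duplicates
-- ===== SOURCE B (Python) =====
-- def _extract_file_list(content_list):
--     """Extract likely file names from generated content (single pass per content)."""
--     common_extensions = ['.rs', '.py', '.gd', '.toml', '.json', '.md', '.js']
--     files = []
--     for content in content_list:
--         first = {}
--         for line in content.split('\n'):
--             if len(line) < 100:
--                 for ext in common_extensions:
--                     if ext not in first and ext in line:
--                         first[ext] = line.strip()
--         files.extend(first[ext] for ext in common_extensions if ext in first)
--     return list(set(files))
-- ===== Notes on version B (the rewrite author's own statement) =====
-- stated objective: alternative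
-- what changed: Instead of A's per-extension passes over each content (a content.lower() membership gate, then re-splitting into lines and scanning them once for each of the 7 extensions with a separator-character test), B splits each content once and makes a single top-down pass over the lines, recording in a dict the first stripped short line per extension and emitting them in extension order; the redundant lower() gate and the separator test (implied by the extension's '.') are dropped.
import Mathlib
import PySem

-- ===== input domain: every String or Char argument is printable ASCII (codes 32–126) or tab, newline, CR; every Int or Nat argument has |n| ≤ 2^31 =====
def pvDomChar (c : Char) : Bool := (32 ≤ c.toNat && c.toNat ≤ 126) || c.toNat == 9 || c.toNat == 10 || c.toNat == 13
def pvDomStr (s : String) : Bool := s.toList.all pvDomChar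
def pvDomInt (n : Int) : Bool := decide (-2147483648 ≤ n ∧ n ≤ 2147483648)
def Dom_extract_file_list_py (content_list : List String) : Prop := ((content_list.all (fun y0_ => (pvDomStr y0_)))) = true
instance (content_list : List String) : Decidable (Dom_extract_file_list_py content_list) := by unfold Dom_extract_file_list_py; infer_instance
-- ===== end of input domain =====

-- B replaces A's seven per-extension scans of each content (with a content.lower() gate and a
-- separator test) by one split and one top-down pass over the lines recording the first stripped
-- line per extension in a dict (objective: alternative decomposition).
-- Both final `list(set(files))` are ported as PySem.Set.ofList (Python's order is hash-arbitrary;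
-- outputs are compared as sets).

-- ===== PORT A =====
-- the module's common_extensions literal (shared by both ports, as by both Pythons)
def pvCommonExtensions : List String := [".rs", ".py", ".gd", ".toml", ".json", ".md", ".js"]

-- A's inner `for line in lines: if ext in line and len(line) < 100: if any(...): append; break`
-- appends the strip of the FIRST line satisfying all three guards: ported as find? over the
-- conjunction (the break fires exactly when all three hold).
def pvFindLineA (ext : String) (lines : List String) : Option String :=
  lines.find? (fun line =>
    PySem.Str.isIn ext line && decide (PySem.Str.len line < 100)
      && (["/", "\\", "."].any (fun ch => PySem.Str.isIn ch line)))

def extract_file_list_py (content_list : List String) : List String :=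
  let files : List String :=
    content_list.foldl (fun files content =>
      pvCommonExtensions.foldl (fun files ext =>
        if PySem.Str.isIn ext (PySem.Str.lower content) then
          match pvFindLineA ext ((PySem.Str.split? content "\n").getD []) with
          | some line => files ++ [PySem.Str.strip line]
          | none => files
        else files) files) []
  PySem.Set.ofList files

-- ===== PORT B =====
-- single pass over the lines: first[ext] = strip of the first short line containing ext
def pvFirstsB (lines : List String) : PySem.Dict String String :=
  lines.foldl (fun first line =>
    if PySem.Str.len line < 100 then
      pvCommonExtensions.foldl (fun first ext =>
        if !first.contains ext && PySem.Str.isIn ext line then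
          first.insert ext (PySem.Str.strip line)
        else first) first
    else first) PySem.Dict.empty

def extract_file_list_py_alt (content_list : List String) : List String :=
  let files : List String :=
    content_list.foldl (fun files content =>
      let first := pvFirstsB ((PySem.Str.split? content "\n").getD [])
      files ++ pvCommonExtensions.filterMap (fun ext => first.get? ext)) []
  PySem.Set.ofList files

-- ===== PRECONDITION & SPEC =====
def Spec_extract_file_list_py (content_list : List String) (out : List String) : Prop := out = extract_file_list_py_alt content_list
instance (content_list : List String) (out : List String) : Decidable (Spec_extract_file_list_py content_list out) := by unfold Spec_extract_file_list_py; infer_instance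

-- ===== CLAIM (what is proved, stated in full; the proofs are below) =====
def Claim_equal_extract_file_list_py : Prop := ∀ (content_list : List String), Dom_extract_file_list_py content_list → Spec_extract_file_list_py content_list (extract_file_list_py content_list)

-- ===== LEMMAS AND PROOFS =====

-- B's per-content predicate on a line, for a fixed extension
def pvPredB (ext line : String) : Bool :=
  decide (PySem.Str.len line < 100) && PySem.Str.isIn ext line

-- every piece produced by Chars.splitOn.go is an element of acc or an infix of cur.reverse ++ l
lemma pv_go_infix (sep : List Char) : ∀ (fuel : ℕ) (l cur : List Char) (acc : List (List Char))
    (piece : List Char), piece ∈ PySem.Chars.splitOn.go sep fuel l cur acc →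
    piece ∈ acc ∨ piece <:+: (cur.reverse ++ l) := by
  intro fuel
  induction fuel with
  | zero =>
    intro l cur acc piece h
    simp only [PySem.Chars.splitOn.go, List.mem_reverse, List.mem_cons] at h
    rcases h with h | h
    · exact Or.inr (h ▸ List.infix_rfl)
    · exact Or.inl h
  | succ fuel ih =>
    intro l cur acc piece h
    cases l with
    | nil =>
      simp only [PySem.Chars.splitOn.go, List.mem_reverse, List.mem_cons] at h
      rcases h with h | h
      · exact Or.inr (h ▸ (List.prefix_append cur.reverse []).isInfix)
      · exact Or.inl h
    | cons c rest =>
      simp only [PySem.Chars.splitOn.go] at h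
      by_cases hp : sep.isPrefixOf (c :: rest) = true
      · rw [if_pos hp] at h
        rcases ih _ _ _ _ h with hmem | hinf
        · rcases List.mem_cons.mp hmem with h1 | h2
          · exact Or.inr (h1 ▸ (List.prefix_append cur.reverse (c :: rest)).isInfix)
          · exact Or.inl h2
        · refine Or.inr (hinf.trans ?_)
          simp only [List.reverse_nil, List.nil_append]
          exact ((List.drop_suffix sep.length (c :: rest)).isInfix).trans
            (List.suffix_append cur.reverse (c :: rest)).isInfix
      · rw [if_neg hp] at h
        rcases ih _ _ _ _ h with hmem | hinf
        · exact Or.inl hmem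
        · refine Or.inr (hinf.trans ?_)
          simp only [List.reverse_cons, List.append_assoc, List.singleton_append]
          exact List.infix_rfl

-- each line of content.split('\n') is an infix of the content
lemma pv_mem_split_infix (c line : String)
    (h : line ∈ (PySem.Str.split? c "\n").getD []) : line.toList <:+: c.toList := by
  simp only [PySem.Str.split?, PySem.Chars.split?] at h
  have hsep : ("\n".toList.isEmpty) = false := by decide
  rw [hsep] at h
  simp only [Bool.false_eq_true, if_false, Option.map_some, Option.getD_some, List.mem_map] at h
  obtain ⟨piece, hmem, hline⟩ := h
  have := pv_go_infix "\n".toList (c.toList.length + 1) c.toList [] [] piece hmem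
  rcases this with h0 | hinf
  · simp at h0
  · subst hline
    simpa using hinf

-- each extension literal starts with '.'
lemma pv_dot_prefix (ext : String) (h : ext ∈ pvCommonExtensions) : ['.'] <+: ext.toList := by
  fin_cases h <;> decide

-- each extension literal is fixed by char-wise lowering
lemma pv_lower_fix (ext : String) (h : ext ∈ pvCommonExtensions) :
    ext.toList.map PySem.Chars.lowerChar = ext.toList := by
  fin_cases h <;> decide

-- A's triple guard coincides with B's double guard on every line (the '.' of the extension
-- already supplies a separator character)
lemma pv_pred_eq (ext : String) (h : ext ∈ pvCommonExtensions) (line : String) :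
    (PySem.Str.isIn ext line && decide (PySem.Str.len line < 100)
      && (["/", "\\", "."].any (fun ch => PySem.Str.isIn ch line))) = pvPredB ext line := by
  unfold pvPredB
  by_cases hin : PySem.Str.isIn ext line = true
  · have hdot : PySem.Str.isIn "." line = true := by
      rw [PySem.Str.isIn_iff_infix]
      have h1 : ('.' :: []) <:+: ext.toList := (pv_dot_prefix ext h).isInfix
      have h2 := (PySem.Str.isIn_iff_infix ext line).mp hin
      exact h1.trans h2
    have hin' : PySem.Chars.isIn ext.toList line.toList = true := by simpa using hin
    have hdot' : PySem.Chars.isIn ['.'] line.toList = true := by simpa using hdot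
    simp [hin', Bool.and_comm]
    intro _
    right; right; exact hdot'
  · have hin' : PySem.Chars.isIn ext.toList line.toList = false := by simpa using hin
    simp [hin']

-- if the extension occurs in no form in content.lower(), then no line matches B's predicate
lemma pv_gate_false (ext : String) (h : ext ∈ pvCommonExtensions) (c : String)
    (hg : PySem.Str.isIn ext (PySem.Str.lower c) = false) :
    ((PySem.Str.split? c "\n").getD []).find? (pvPredB ext) = none := by
  rw [List.find?_eq_none]
  intro line hline
  unfold pvPredB
  by_cases hin : PySem.Str.isIn ext line = true
  · exfalso
    have h1 := (PySem.Str.isIn_iff_infix ext line).mp hin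
    have h2 := (h1.trans (pv_mem_split_infix c line hline)).map PySem.Chars.lowerChar
    rw [pv_lower_fix ext h] at h2
    have : PySem.Str.isIn ext (PySem.Str.lower c) = true := by
      rw [PySem.Str.isIn_iff_infix, PySem.Str.toList_lower]
      simpa [PySem.Chars.lower] using h2
    rw [hg] at this; exact absurd this (by decide)
  · have hin' : PySem.Chars.isIn ext.toList line.toList = false := by simpa using hin
    simp [hin']

-- the inner extension fold of B: effect on one lookup
lemma pv_inner_get? (line : String) : ∀ (es : List String) (d : PySem.Dict String String)
    (ext : String),
    (es.foldl (fun d e =>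
        if !d.contains e && PySem.Str.isIn e line then
          d.insert e (PySem.Str.strip line) else d) d).get? ext
      = if ext ∈ es ∧ d.contains ext = false ∧ PySem.Str.isIn ext line = true then
          some (PySem.Str.strip line)
        else d.get? ext := by
  intro es
  induction es with
  | nil => intro d ext; simp
  | cons e es ih =>
    intro d ext
    simp only [List.foldl_cons]
    by_cases he : e = ext
    · subst he
      by_cases hc : d.contains e
      · rw [if_neg (by simp [hc])]
        rw [ih]
        simp [hc]
      · by_cases hin : PySem.Str.isIn e line = true
        · have hin' : PySem.Chars.isIn e.toList line.toList = true := by simpa using hin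
          rw [if_pos (by simp [hc, hin'])]
          rw [ih]
          simp [PySem.Dict.contains_insert_self, PySem.Dict.get?_insert_self, hc, hin']
        · have hin' : PySem.Chars.isIn e.toList line.toList = false := by simpa using hin
          rw [if_neg (by simp [hin'])]
          rw [ih]
          simp [hin']
    · have he' : ¬ ext = e := fun hh => he hh.symm
      have hget : ∀ (d' : PySem.Dict String String),
          (if !d'.contains e && PySem.Str.isIn e line then
            d'.insert e (PySem.Str.strip line) else d').get? ext = d'.get? ext := by
        intro d'
        split
        · exact PySem.Dict.get?_insert_of_ne d' _ he'
        · rfl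
      have hcon : ∀ (d' : PySem.Dict String String),
          (if !d'.contains e && PySem.Str.isIn e line then
            d'.insert e (PySem.Str.strip line) else d').contains ext = d'.contains ext := by
        intro d'
        split
        · rw [PySem.Dict.contains_insert]
          simp [beq_eq_false_iff_ne.mpr he']
        · rfl
      rw [ih, hcon, hget]
      simp [he']

-- the line fold of B: the dict's lookup is the stripped first matching line
lemma pv_lines_get? (ext : String) (hext : ext ∈ pvCommonExtensions) :
    ∀ (lines : List String) (d : PySem.Dict String String),
    (lines.foldl (fun first line =>
        if PySem.Str.len line < 100 then
          pvCommonExtensions.foldl (fun first e =>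
            if !first.contains e && PySem.Str.isIn e line then
              first.insert e (PySem.Str.strip line)
            else first) first
        else first) d).get? ext
      = (d.get? ext).or ((lines.find? (pvPredB ext)).map PySem.Str.strip) := by
  intro lines
  induction lines with
  | nil => intro d; simp
  | cons line lines ih =>
    intro d
    simp only [List.foldl_cons]
    by_cases hlen : PySem.Str.len line < 100
    · have hlen' : line.length < 100 := by simpa using hlen
      rw [if_pos hlen, ih, pv_inner_get?]
      by_cases hc : d.contains ext
      · have : ∃ v, d.get? ext = some v := by
          rcases hv : d.get? ext with _ | v
          · rw [PySem.Dict.get?_eq_none_iff_contains] at hv; rw [hv] at hc; simp at hc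
          · exact ⟨v, rfl⟩
        obtain ⟨v, hv⟩ := this
        simp [hc, hv]
      · by_cases hin : PySem.Str.isIn ext line = true
        · have hin' : PySem.Chars.isIn ext.toList line.toList = true := by simpa using hin
          have hfind : List.find? (pvPredB ext) (line :: lines)
              = some line := by
            rw [List.find?_cons_of_pos]
            unfold pvPredB; simp [hlen', hin']
          have hnone : d.get? ext = none :=
            (PySem.Dict.get?_eq_none_iff_contains d ext).mpr (by simpa using hc)
          simp [hext, hc, hin', hfind, hnone]
        · have hin' : PySem.Chars.isIn ext.toList line.toList = false := by simpa using hin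
          have hfind : List.find? (pvPredB ext) (line :: lines)
              = List.find? (pvPredB ext) lines := by
            rw [List.find?_cons_of_neg]
            unfold pvPredB; simp [hin']
          simp [hin', hfind]
    · have hlen' : ¬ line.length < 100 := by simpa using hlen
      rw [if_neg hlen]
      have hfind : List.find? (pvPredB ext) (line :: lines)
          = List.find? (pvPredB ext) lines := by
        rw [List.find?_cons_of_neg]
        unfold pvPredB; simp [hlen']
      rw [ih, hfind]

-- a foldl that appends the toList of an option equals append of filterMap
lemma pv_foldl_opt {α β : Type} (g : α → Option β) :
    ∀ (es : List α) (step : List β → α → List β)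
    (h : ∀ e ∈ es, ∀ a, step a e = a ++ (g e).toList) (acc : List β),
    es.foldl step acc = acc ++ es.filterMap g := by
  intro es
  induction es with
  | nil => intro step _ acc; simp
  | cons e es ih =>
    intro step h acc
    simp only [List.foldl_cons, List.filterMap_cons]
    rw [h e (List.mem_cons_self) acc,
        ih step (fun e' he' => h e' (List.mem_cons_of_mem _ he'))]
    cases hg : g e <;> simp [List.append_assoc]

-- the per-content contribution, shared characterisation
def pvContrib (content : String) : List String :=
  pvCommonExtensions.filterMap (fun ext =>
    (((PySem.Str.split? content "\n").getD []).find? (pvPredB ext)).map PySem.Str.strip)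

-- A's per-content step produces acc ++ pvContrib content
lemma pv_stepA (content : String) (acc : List String) :
    pvCommonExtensions.foldl (fun files ext =>
      if PySem.Str.isIn ext (PySem.Str.lower content) then
        match pvFindLineA ext ((PySem.Str.split? content "\n").getD []) with
        | some line => files ++ [PySem.Str.strip line]
        | none => files
      else files) acc = acc ++ pvContrib content := by
  unfold pvContrib
  refine pv_foldl_opt _ pvCommonExtensions ?_ ?_ acc
  intro ext hext a
  have hfind : pvFindLineA ext ((PySem.Str.split? content "\n").getD [])
      = ((PySem.Str.split? content "\n").getD []).find? (pvPredB ext) := by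
    unfold pvFindLineA
    congr 1
    funext line
    exact pv_pred_eq ext hext line
  by_cases hg : PySem.Str.isIn ext (PySem.Str.lower content) = true
  · rw [if_pos hg, hfind]
    cases hf : ((PySem.Str.split? content "\n").getD []).find? (pvPredB ext) <;> simp
  · have hg' : PySem.Str.isIn ext (PySem.Str.lower content) = false := by simpa using hg
    rw [if_neg hg]
    rw [pv_gate_false ext hext content hg']
    simp

-- B's per-content step produces acc ++ pvContrib content
lemma pv_stepB (content : String) (acc : List String) :
    acc ++ pvCommonExtensions.filterMap (fun ext =>
        (pvFirstsB ((PySem.Str.split? content "\n").getD [])).get? ext)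
      = acc ++ pvContrib content := by
  unfold pvContrib
  congr 1
  apply List.filterMap_congr
  intro ext hext
  unfold pvFirstsB
  rw [pv_lines_get? ext hext, PySem.Dict.get?_empty]
  simp

-- the outer folds agree
lemma pv_outer : ∀ (cl : List String) (acc : List String),
    cl.foldl (fun files content =>
      pvCommonExtensions.foldl (fun files ext =>
        if PySem.Str.isIn ext (PySem.Str.lower content) then
          match pvFindLineA ext ((PySem.Str.split? content "\n").getD []) with
          | some line => files ++ [PySem.Str.strip line]
          | none => files
        else files) files) acc
    = cl.foldl (fun files content =>
        files ++ pvCommonExtensions.filterMap (fun ext =>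
          (pvFirstsB ((PySem.Str.split? content "\n").getD [])).get? ext)) acc := by
  intro cl
  induction cl with
  | nil => intro acc; rfl
  | cons c cl ih =>
    intro acc
    simp only [List.foldl_cons]
    rw [pv_stepA c acc, pv_stepB c acc]
    exact ih (acc ++ pvContrib c)

-- ===== VERDICT (by name: the statement is the Claim_ definition above) =====
theorem extract_file_list_py_spec : Claim_equal_extract_file_list_py := by
  intro content_list _
  unfold Spec_extract_file_list_py extract_file_list_py extract_file_list_py_alt
  rw [pv_outer]
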